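-- pv_equiv track=rewrite | github.com/MikeTurkey/shacksum | script/shacksum.py | _analyze_afteralgostr
-- ===== SOURCE A (Python) =====
-- import typing
--
-- class _Hashrowstringstyle_style_namedtuple(typing.NamedTuple):
--     opensslstyle: bool = False
--     BSDstyle: bool = False
--     GNUstyle: bool = False
--
--     def _maketrue(self, names: list):
--         '''
--           make true value attribute.
--           Turn True if style name string in in styles list.
--         names(str): style name string of list.  e.g. ['opensslstyle', 'BSDstyle']
--         recipe
--           t = _Hashrowstringstyle_style_namedtuple();
--           t = t._maketrue(['opensslstyle', 'BSDstyle']);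
--             t.opensslstyle: True
--             t.BSDstyle    : True
--             t.GNUstyle    : False
--         '''
--         name: str
--         d = self._asdict()
--         result = d
--         for name in names:
--             if isinstance(name, str) != True:
--                 errmes = 'Error: names is string of list type.'
--                 raise TypeError(errmes)
--             if name not in d.keys():
--                 errmes = 'Error: unknown style name [{0}]'.format(name)
--                 raise ValueError(errmes)
--         for name in d.keys():
--             if name in names:
--                 result[name] = True
--         t = self._make(result.values())
--         return t
--
-- def _analyze_afteralgostr(row: str) -> tuple:
--     hashinfo: str
--     bsdstyle: str
--     opensslstyle: str
--     style: tuple = _Hashrowstringstyle_style_namedtuple()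
--     hashinfos: tuple = ('MD5', 'SHA1', "SHA2-224", "SHA224",
--                         "SHA2-256", "SHA256",
--                         "SHA2-384", "SHA384",
--                         "SHA2-512", "SHA512",
--                         "SHA2-512/224", "SHA512-224",
--                         "SHA2-512/256", "SHA512-256",
--                         "SHA3-224", "SHA3-256", "SHA3-384", "SHA3-512")
--     for hashinfo in hashinfos:
--         bsdstyle = '{0} '.format(hashinfo)
--         opensslstyle = '{0}('.format(hashinfo)
--         if row.startswith(bsdstyle):
--             return style._maketrue(['BSDstyle'])
--         elif row.startswith(opensslstyle):
--             return style._maketrue(['opensslstyle'])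
--     return style  # Not match.
-- ===== SOURCE B (Python) =====
-- import typing
--
-- class _Hashrowstringstyle_style_namedtuple(typing.NamedTuple):
--     opensslstyle: bool = False
--     BSDstyle: bool = False
--     GNUstyle: bool = False
--
--     def _maketrue(self, names: list):
--         name: str
--         d = self._asdict()
--         result = d
--         for name in names:
--             if isinstance(name, str) != True:
--                 errmes = 'Error: names is string of list type.'
--                 raise TypeError(errmes)
--             if name not in d.keys():
--                 errmes = 'Error: unknown style name [{0}]'.format(name)
--                 raise ValueError(errmes)
--         for name in d.keys():
--             if name in names:
--                 result[name] = True
--         t = self._make(result.values())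
--         return t
--
-- _HASHNAMES = frozenset((
--     'MD5', 'SHA1', 'SHA2-224', 'SHA224', 'SHA2-256', 'SHA256',
--     'SHA2-384', 'SHA384', 'SHA2-512', 'SHA512', 'SHA2-512/224',
--     'SHA512-224', 'SHA2-512/256', 'SHA512-256', 'SHA3-224',
--     'SHA3-256', 'SHA3-384', 'SHA3-512'))
--
-- def _analyze_afteralgostr(row: str) -> tuple:
--     style = _Hashrowstringstyle_style_namedtuple()
--     token = []
--     for ch in row:
--         if ch in ' (':
--             if ''.join(token) in _HASHNAMES:
--                 return style._maketrue(
--                     ['BSDstyle' if ch == ' ' else 'opensslstyle'])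
--             return style
--         token.append(ch)
--     return style
-- ===== Notes on version B (the rewrite author's own statement) =====
-- stated objective: simpler
-- what changed: Instead of looping over the 18 hash names and testing two startswith prefixes per name (36 prefix tests), B scans the row once for the earliest space/open-parenthesis separator and looks the token before it up in a frozenset of the 18 names.
import Mathlib
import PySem

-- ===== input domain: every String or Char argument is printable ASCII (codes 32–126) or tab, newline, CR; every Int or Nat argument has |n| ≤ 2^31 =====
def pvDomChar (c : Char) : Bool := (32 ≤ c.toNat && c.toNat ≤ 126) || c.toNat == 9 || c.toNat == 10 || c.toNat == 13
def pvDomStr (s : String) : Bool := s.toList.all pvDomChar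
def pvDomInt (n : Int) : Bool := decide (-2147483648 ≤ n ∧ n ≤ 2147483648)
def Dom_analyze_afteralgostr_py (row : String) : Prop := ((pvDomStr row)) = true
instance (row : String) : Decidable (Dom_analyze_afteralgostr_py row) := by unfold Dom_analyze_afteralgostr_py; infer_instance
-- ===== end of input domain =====

-- B replaces A's loop over the 18 hash names (two startswith tests per name) by a single scan of
-- the row for its earliest space/open-parenthesis separator plus one set lookup of the token before it (simpler).
-- The returned triple is the namedtuple's fields (opensslstyle, BSDstyle, GNUstyle).

-- ===== PORT A =====
def pvHashinfos : List String :=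
  ["MD5", "SHA1", "SHA2-224", "SHA224", "SHA2-256", "SHA256",
   "SHA2-384", "SHA384", "SHA2-512", "SHA512",
   "SHA2-512/224", "SHA512-224", "SHA2-512/256", "SHA512-256",
   "SHA3-224", "SHA3-256", "SHA3-384", "SHA3-512"]

-- A's for-loop over hashinfos with its two early returns
def pvGoA : List String → String → Bool × Bool × Bool
  | [], _ => (false, false, false)
  | h :: t, row =>
    if PySem.Str.startswith row (h ++ " ") then (false, true, false)
    else if PySem.Str.startswith row (h ++ "(") then (true, false, false)
    else pvGoA t row

def analyze_afteralgostr_py (row : String) : Bool × Bool × Bool :=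
  pvGoA pvHashinfos row

-- ===== PORT B =====
-- B's for-loop over the characters of row, accumulating the token read so far
def pvScanB : List Char → List Char → Bool × Bool × Bool
  | _, [] => (false, false, false)
  | tok, ch :: rest =>
    if ch == ' ' || ch == '(' then
      if pvHashinfos.contains (String.ofList tok) then
        (if ch == ' ' then (false, true, false) else (true, false, false))
      else (false, false, false)
    else pvScanB (tok ++ [ch]) rest

def analyze_afteralgostr_py_alt (row : String) : Bool × Bool × Bool :=
  pvScanB [] row.toList

-- ===== PRECONDITION & SPEC =====
def Spec_analyze_afteralgostr_py (row : String) (out : Bool × Bool × Bool) : Prop := out = analyze_afteralgostr_py_alt row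
instance (row : String) (out : Bool × Bool × Bool) : Decidable (Spec_analyze_afteralgostr_py row out) := by unfold Spec_analyze_afteralgostr_py; infer_instance

-- ===== CLAIM (what is proved, stated in full; the proofs are below) =====
def Claim_equal_analyze_afteralgostr_py : Prop := ∀ (row : String), Dom_analyze_afteralgostr_py row → Spec_analyze_afteralgostr_py row (analyze_afteralgostr_py row)

-- ===== LEMMAS AND PROOFS =====

-- a char is one of the two separator characters
def pvSep (c : Char) : Bool := c == ' ' || c == '('

def pvStep (names : List String) (tok : List Char) (c : Char) : Bool × Bool × Bool :=
  if names.contains (String.ofList tok) then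
    (if c == ' ' then (false, true, false) else (true, false, false))
  else (false, false, false)

-- shared characterization: both programs' answer as a function of the first-separator decomposition
def pvChar (names : List String) (cs : List Char) : Bool × Bool × Bool :=
  match cs.findIdx? pvSep with
  | none => (false, false, false)
  | some i => pvStep names (cs.take i) (cs.getD i ' ')

lemma pvScanB_char (cs : List Char) : ∀ tok,
    pvScanB tok cs =
      match cs.findIdx? pvSep with
      | none => (false, false, false)
      | some i => pvStep pvHashinfos (tok ++ cs.take i) (cs.getD i ' ') := by
  induction cs with
  | nil => intro tok; simp [pvScanB]
  | cons ch rest ih =>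
    intro tok
    by_cases h : pvSep ch = true
    · have h' : (ch == ' ' || ch == '(') = true := h
      simp only [pvScanB, h', if_true, List.findIdx?_cons, h]
      simp [pvStep]
    · have h' : (ch == ' ' || ch == '(') = false := by simpa [pvSep] using h
      simp only [pvScanB, h', List.findIdx?_cons]
      rw [ih (tok ++ [ch])]
      cases hf : rest.findIdx? pvSep with
      | none => simp [h]
      | some i => simp [h]

lemma pvStartswith_iff (row : String) (h : String) (x : Char)
    (hfree : ∀ c ∈ h.toList, pvSep c = false) (hx : pvSep x = true) :
    PySem.Str.startswith row (h ++ x.toString) = true ↔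
      ∃ i, row.toList.findIdx? pvSep = some i ∧ row.toList.take i = h.toList ∧ row.toList.getD i ' ' = x := by
  rw [PySem.Str.startswith_eq, PySem.Chars.startswith_iff]
  have htl : (h ++ x.toString).toList = h.toList ++ [x] := by
    simp
  rw [htl]
  constructor
  · rintro ⟨post, hpost⟩
    rw [List.append_assoc] at hpost
    refine ⟨h.toList.length, ?_, ?_, ?_⟩
    · rw [← hpost, List.findIdx?_eq_some_iff_getElem]
      have hlt : h.toList.length < (h.toList ++ ([x] ++ post)).length := by simp
      refine ⟨hlt, ?_, ?_⟩
      · have : (h.toList ++ ([x] ++ post))[h.toList.length] = x := by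
          rw [List.getElem_append_right (by omega)]; simp
        rw [this]; exact hx
      · intro j hj
        rw [List.getElem_append_left hj]
        simp [hfree _ (List.getElem_mem _)]
    · rw [← hpost, List.take_left]
    · rw [← hpost]
      rw [List.getD_eq_getElem _ _ (by simp)]
      rw [List.getElem_append_right (by omega)]; simp
  · rintro ⟨i, hfind, htake, hget⟩
    rw [List.findIdx?_eq_some_iff_getElem] at hfind
    obtain ⟨hlt, _, _⟩ := hfind
    have hdecomp : row.toList = row.toList.take i ++ row.toList[i] :: row.toList.drop (i+1) := by
      rw [List.getElem_cons_drop]; exact (List.take_append_drop i _).symm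
    have hgx : row.toList[i] = x := by
      rw [List.getD_eq_getElem _ _ hlt] at hget; exact hget
    refine ⟨row.toList.drop (i+1), ?_⟩
    conv_rhs => rw [hdecomp]
    rw [htake, hgx]
    simp

lemma pvGoA_char (names : List String) (row : String)
    (hfree : ∀ h ∈ names, ∀ c ∈ h.toList, pvSep c = false) :
    pvGoA names row = pvChar names row.toList := by
  induction names with
  | nil =>
    simp only [pvGoA, pvChar]
    cases row.toList.findIdx? pvSep with
    | none => rfl
    | some i => simp [pvStep]
  | cons h t ih =>
    have hfh : ∀ c ∈ h.toList, pvSep c = false := hfree h (by simp)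
    have hsSpace : pvSep ' ' = true := by decide
    have hsParen : pvSep '(' = true := by decide
    have hSp : (" " : String) = (' ' : Char).toString := rfl
    have hPa : ("(" : String) = ('(' : Char).toString := rfl
    simp only [pvGoA]
    rw [hSp, hPa]
    cases hf : row.toList.findIdx? pvSep with
    | none =>
      have nosw : ∀ x : Char, pvSep x = true → PySem.Str.startswith row (h ++ x.toString) = false := by
        intro x hx
        by_contra hcon
        rw [Bool.not_eq_false] at hcon
        obtain ⟨i, hi, _, _⟩ := (pvStartswith_iff row h x hfh hx).mp hcon
        rw [hf] at hi; cases hi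
      rw [nosw ' ' hsSpace, nosw '(' hsParen]
      simp only [Bool.false_eq_true, if_false]
      rw [ih (fun g hg => hfree g (by simp [hg]))]
      simp [pvChar, hf]
    | some i =>
      have hfind := hf
      rw [List.findIdx?_eq_some_iff_getElem] at hfind
      obtain ⟨hlt, hpi, hprev⟩ := hfind
      have hc : row.toList.getD i ' ' = row.toList[i] := List.getD_eq_getElem _ _ hlt
      by_cases htok : h.toList = row.toList.take i
      · -- h matches the token: String.ofList (take i) = h
        have hofl : String.ofList (row.toList.take i) = h := by
          rw [← htok, String.ofList_toList]
        have hcont : (h :: t).contains (String.ofList (row.toList.take i)) = true := by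
          simp [hofl]
        have hsw : ∀ x : Char, pvSep x = true →
            PySem.Str.startswith row (h ++ x.toString) = (row.toList[i] == x) := by
          intro x hx
          by_cases hxx : row.toList[i] = x
          · rw [(pvStartswith_iff row h x hfh hx).mpr ⟨i, hf, htok.symm, by rw [hc, hxx]⟩]
            simp [hxx]
          · have : PySem.Str.startswith row (h ++ x.toString) = false := by
              by_contra hcon
              rw [Bool.not_eq_false] at hcon
              obtain ⟨i', hi', _, hget'⟩ := (pvStartswith_iff row h x hfh hx).mp hcon
              rw [hf] at hi'; injection hi' with hi'
              rw [← hi'] at hget'; rw [hc] at hget'; exact hxx hget'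
            rw [this]; exact (beq_eq_false_iff_ne.mpr hxx).symm
        rw [hsw ' ' hsSpace, hsw '(' hsParen]
        simp only [pvChar, hf, pvStep, hcont, if_true, hc]
        by_cases hsp : row.toList[i] = ' '
        · simp [hsp]
        · have hparen : row.toList[i] = '(' := by
            have := hpi
            simp only [pvSep, Bool.or_eq_true, beq_iff_eq] at this
            rcases this with h1 | h2
            · exact absurd h1 hsp
            · exact h2
          simp [hparen]
      · have nosw : ∀ x : Char, pvSep x = true → PySem.Str.startswith row (h ++ x.toString) = false := by
          intro x hx
          by_contra hcon
          rw [Bool.not_eq_false] at hcon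
          obtain ⟨i', hi', htake', _⟩ := (pvStartswith_iff row h x hfh hx).mp hcon
          rw [hf] at hi'; injection hi' with hi'
          rw [← hi'] at htake'
          exact htok htake'.symm
        rw [nosw ' ' hsSpace, nosw '(' hsParen]
        simp only [Bool.false_eq_true, if_false]
        rw [ih (fun g hg => hfree g (by simp [hg]))]
        have hne : (h == String.ofList (row.toList.take i)) = false := by
          rw [beq_eq_false_iff_ne]
          intro heq
          apply htok
          rw [heq, String.toList_ofList]
        have hne' : (String.ofList (row.toList.take i) == h) = false := by
          rw [beq_eq_false_iff_ne] at *
          exact fun e => hne e.symm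
        simp only [pvChar, hf, pvStep, List.contains_cons, hne', Bool.false_or]

lemma pvNamesFree : ∀ h ∈ pvHashinfos, ∀ c ∈ h.toList, pvSep c = false := by
  have hall : pvHashinfos.all (fun h => h.toList.all (fun c => !pvSep c)) = true := by decide
  intro h hh c hc
  rw [List.all_eq_true] at hall
  have := List.all_eq_true.mp (hall h hh) c hc
  simpa using this

theorem pv_main (row : String) :
    analyze_afteralgostr_py row = analyze_afteralgostr_py_alt row := by
  unfold analyze_afteralgostr_py analyze_afteralgostr_py_alt
  rw [pvGoA_char pvHashinfos row pvNamesFree, pvScanB_char row.toList []]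
  unfold pvChar
  cases row.toList.findIdx? pvSep with
  | none => rfl
  | some i => simp [pvStep]

-- ===== VERDICT (by name: the statement is the Claim_ definition above) =====
theorem analyze_afteralgostr_py_spec : Claim_equal_analyze_afteralgostr_py := by
  intro row _
  exact pv_main row
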